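-- pv_equiv track=rewrite | github.com/danilotpnta/citeguard | app/agents/tools/verifiers/crossref.py | _check_author_match
-- ===== SOURCE A (Python) =====
-- def _extract_lastname(author: str) -> str:
--     """
--     Extract last name from any common format:
--       'Ashish Vaswani'   → 'vaswani'
--       'A. Vaswani'       → 'vaswani'
--       'Vaswani, A.'      → 'vaswani'
--       'Vaswani'          → 'vaswani'
--     """
--     author = author.strip().rstrip(".")
--     if "," in author:
--         # 'Lastname, F.' format
--         return author.split(",")[0].strip().lower()
--     parts = author.split()
--     return parts[-1].lower() if parts else author.lower()
--
-- def _check_author_match(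
--     cited_authors: list[str] | None,
--     crossref_authors: list[dict],
-- ) -> bool | None:
--     """
--     Returns True if at least one cited last name appears in Crossref authors.
--     Returns None if we have no author data to compare.
--     """
--     if not cited_authors or not crossref_authors:
--         return None
--
--     cited_lastnames = {_extract_lastname(a) for a in cited_authors}
--
--     crossref_lastnames = set()
--     for author in crossref_authors:
--         family = author.get("family", "")
--         if family:
--             crossref_lastnames.add(family.lower())
--
--     if not crossref_lastnames:
--         return None
--
--     return bool(cited_lastnames & crossref_lastnames)
-- ===== SOURCE B (Python) =====
-- def _extract_lastname(author: str) -> str: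
--     author = author.strip().rstrip(".")
--     if "," in author:
--         return author.split(",")[0].strip().lower()
--     parts = author.split()
--     return parts[-1].lower() if parts else author.lower()
--
-- def _check_author_match(
--     cited_authors,
--     crossref_authors,
-- ):
--     if not cited_authors or not crossref_authors:
--         return None
--
--     fams = sorted({a.get("family", "").lower()
--                    for a in crossref_authors if a.get("family", "")})
--     if not fams:
--         return None
--
--     cited = sorted({_extract_lastname(a) for a in cited_authors})
--
--     # two-pointer merge over the two sorted, duplicate-free lists
--     i = j = 0
--     while i < len(cited) and j < len(fams):
--         if cited[i] < fams[j]: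
--             i += 1
--         elif fams[j] < cited[i]:
--             j += 1
--         else:
--             return True
--     return False
-- ===== Notes on version B (the rewrite author's own statement) =====
-- stated objective: alternative
-- what changed: Replaces hash-set intersection by sorting the two deduplicated name lists and running a two-pointer merge scan that stops at the first common element; no membership test or set intersection remains.
import Mathlib
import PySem

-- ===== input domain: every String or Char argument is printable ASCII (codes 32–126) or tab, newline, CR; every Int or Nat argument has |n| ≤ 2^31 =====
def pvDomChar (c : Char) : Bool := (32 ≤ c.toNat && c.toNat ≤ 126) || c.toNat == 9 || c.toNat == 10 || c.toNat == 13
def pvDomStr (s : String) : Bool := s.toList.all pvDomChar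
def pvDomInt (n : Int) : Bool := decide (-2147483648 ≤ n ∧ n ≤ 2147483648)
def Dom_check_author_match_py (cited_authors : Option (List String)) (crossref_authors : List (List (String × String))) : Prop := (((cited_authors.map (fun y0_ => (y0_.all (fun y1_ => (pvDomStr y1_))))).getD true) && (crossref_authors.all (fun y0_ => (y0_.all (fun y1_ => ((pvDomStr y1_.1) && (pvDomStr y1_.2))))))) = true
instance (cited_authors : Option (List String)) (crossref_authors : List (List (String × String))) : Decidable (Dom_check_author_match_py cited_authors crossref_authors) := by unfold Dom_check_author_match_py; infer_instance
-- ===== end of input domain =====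

-- B replaces A's two hash sets + intersection by sorting the deduplicated name lists and a
-- two-pointer merge scan for a common element (objective: alternative algorithm, same result).

-- ===== PORT A =====
-- author.rstrip(".") — ported by hand (PySem has no rstrip-with-chars); exact: drops all trailing '.'.
def pvRstripDots (s : String) : String := String.ofList ((s.toList.reverse.dropWhile (fun c => c == '.')).reverse)

-- shared helper: both Source A and Source B contain the identical _extract_lastname
def extractLastname (author : String) : String :=
  let a := pvRstripDots (PySem.Str.strip author)
  if PySem.Str.isIn "," a then
    PySem.Str.lower (PySem.Str.strip ((((PySem.Str.split? a ",").getD []).headD "")))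
  else
    match (PySem.Str.split₀ a).getLast? with
    | some p => PySem.Str.lower p
    | none => PySem.Str.lower a

-- author.get("family", "") on the assoc-list dict
def pvFamily (author : List (String × String)) : String :=
  PySem.Dict.getD (PySem.Dict.mk author) "family" ""

def check_author_match_py (cited_authors : Option (List String)) (crossref_authors : List (List (String × String))) : Option Bool :=
  match cited_authors with
  | none => none
  | some cited =>
    if cited.isEmpty || crossref_authors.isEmpty then none
    else
      let citedS : PySem.Set String := PySem.Set.ofList (cited.map extractLastname)
      let crossS : PySem.Set String := crossref_authors.foldl (fun s author =>
        let family := pvFamily author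
        if family ≠ "" then PySem.Set.add s (PySem.Str.lower family) else s) PySem.Set.empty
      if crossS.isEmpty then none
      else some (!(PySem.Set.inter citedS crossS).isEmpty)

-- ===== PORT B =====
-- the while-loop two-pointer merge, transcribed as recursion on the two suffixes
def mergeHasCommon : List String → List String → Bool
  | [], _ => false
  | _ :: _, [] => false
  | x :: xs, y :: ys =>
    if x < y then mergeHasCommon xs (y :: ys)
    else if y < x then mergeHasCommon (x :: xs) ys
    else true
termination_by xs ys => xs.length + ys.length

def check_author_match_py_alt (cited_authors : Option (List String)) (crossref_authors : List (List (String × String))) : Option Bool :=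
  match cited_authors with
  | none => none
  | some cited =>
    if cited.isEmpty || crossref_authors.isEmpty then none
    else
      let fams := PySem.List.sorted
        (PySem.Set.ofList ((crossref_authors.filter (fun a => pvFamily a ≠ "")).map
          (fun a => PySem.Str.lower (pvFamily a)))) (fun x => x) false
      if fams.isEmpty then none
      else
        let citedL := PySem.List.sorted (PySem.Set.ofList (cited.map extractLastname)) (fun x => x) false
        some (mergeHasCommon citedL fams)

-- ===== PRECONDITION & SPEC =====
def Spec_check_author_match_py (cited_authors : Option (List String)) (crossref_authors : List (List (String × String))) (out : Option Bool) : Prop := out = check_author_match_py_alt cited_authors crossref_authors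
instance (cited_authors : Option (List String)) (crossref_authors : List (List (String × String))) (out : Option Bool) : Decidable (Spec_check_author_match_py cited_authors crossref_authors out) := by unfold Spec_check_author_match_py; infer_instance

-- ===== CLAIM (what is proved, stated in full; the proofs are below) =====
def Claim_equal_check_author_match_py : Prop := ∀ (cited_authors : Option (List String)) (crossref_authors : List (List (String × String))), Dom_check_author_match_py cited_authors crossref_authors → Spec_check_author_match_py cited_authors crossref_authors (check_author_match_py cited_authors crossref_authors)

-- ===== LEMMAS AND PROOFS =====
def pvStep (s : PySem.Set String) (author : List (String × String)) : PySem.Set String :=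
  if pvFamily author ≠ "" then PySem.Set.add s (PySem.Str.lower (pvFamily author)) else s

theorem pvStep_eq_lambda : (fun (s : PySem.Set String) (author : List (String × String)) =>
    let family := pvFamily author
    if family ≠ "" then PySem.Set.add s (PySem.Str.lower family) else s) = pvStep := by
  funext s a; simp [pvStep]

-- membership in A's fold-built crossref set
theorem mem_foldl_pvStep (l : List (List (String × String))) (s : PySem.Set String) (x : String) :
    x ∈ l.foldl pvStep s ↔ x ∈ s ∨ ∃ a ∈ l, pvFamily a ≠ "" ∧ x = PySem.Str.lower (pvFamily a) := by
  induction l generalizing s with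
  | nil => simp
  | cons a rest ih =>
    simp only [List.foldl_cons, ih, List.mem_cons]
    unfold pvStep
    by_cases hfa : pvFamily a ≠ ""
    · rw [if_pos hfa, PySem.Set.mem_add]
      constructor
      · rintro ((h | h) | ⟨b, hb, hf, hx⟩)
        · exact Or.inl h
        · exact Or.inr ⟨a, Or.inl rfl, hfa, h⟩
        · exact Or.inr ⟨b, Or.inr hb, hf, hx⟩
      · rintro (h | ⟨b, hb | hb, hf, hx⟩)
        · exact Or.inl (Or.inl h)
        · subst hb; exact Or.inl (Or.inr hx)
        · exact Or.inr ⟨b, hb, hf, hx⟩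
    · rw [if_neg hfa]
      constructor
      · rintro (h | ⟨b, hb, hf, hx⟩)
        · exact Or.inl h
        · exact Or.inr ⟨b, Or.inr hb, hf, hx⟩
      · rintro (h | ⟨b, hb | hb, hf, hx⟩)
        · exact Or.inl h
        · exact absurd hf (by subst hb; simpa using hfa)
        · exact Or.inr ⟨b, hb, hf, hx⟩

-- membership in B's comprehension-built set
theorem mem_altSet (l : List (List (String × String))) (x : String) :
    x ∈ PySem.Set.ofList ((l.filter (fun a => pvFamily a ≠ "")).map (fun a => PySem.Str.lower (pvFamily a)))
      ↔ ∃ a ∈ l, pvFamily a ≠ "" ∧ x = PySem.Str.lower (pvFamily a) := by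
  rw [PySem.Set.mem_ofList]
  simp only [List.mem_map, List.mem_filter]
  constructor
  · rintro ⟨a, ⟨ha, hf⟩, hx⟩
    exact ⟨a, ha, by simpa using hf, hx.symm⟩
  · rintro ⟨a, ha, hf, hx⟩
    exact ⟨a, ⟨ha, by simpa using hf⟩, hx.symm⟩

-- merge-scan correctness on sorted lists
theorem mergeHasCommon_iff (xs ys : List String)
    (hx : xs.Pairwise (· ≤ ·)) (hy : ys.Pairwise (· ≤ ·)) :
    mergeHasCommon xs ys = true ↔ ∃ z, z ∈ xs ∧ z ∈ ys := by
  induction xs, ys using mergeHasCommon.induct with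
  | case1 ys => simp [mergeHasCommon]
  | case2 x xs => simp [mergeHasCommon]
  | case3 x xs y ys hlt ih =>
    rw [List.pairwise_cons] at hx hy
    unfold mergeHasCommon
    rw [if_pos hlt, ih hx.2 (List.pairwise_cons.mpr hy)]
    constructor
    · rintro ⟨z, hz1, hz2⟩; exact ⟨z, List.mem_cons_of_mem _ hz1, hz2⟩
    · rintro ⟨z, hz1, hz2⟩
      rcases List.mem_cons.mp hz1 with h | h
      · subst h
        rcases List.mem_cons.mp hz2 with h | h
        · exact absurd (h ▸ hlt) (lt_irrefl _)
        · exact absurd (hy.1 _ h) (not_le.mpr hlt)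
      · exact ⟨z, h, hz2⟩
  | case4 x xs y ys hlt hgt ih =>
    rw [List.pairwise_cons] at hx hy
    unfold mergeHasCommon
    rw [if_neg hlt, if_pos hgt, ih (List.pairwise_cons.mpr hx) hy.2]
    constructor
    · rintro ⟨z, hz1, hz2⟩; exact ⟨z, hz1, List.mem_cons_of_mem _ hz2⟩
    · rintro ⟨z, hz1, hz2⟩
      rcases List.mem_cons.mp hz2 with h | h
      · subst h
        rcases List.mem_cons.mp hz1 with h | h
        · exact absurd (h ▸ hgt) (lt_irrefl _)
        · exact absurd hgt (not_lt.mpr (hx.1 z h))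
      · exact ⟨z, hz1, h⟩
  | case5 x xs y ys hlt hgt =>
    have hxy : x = y := le_antisymm (not_lt.mp hgt) (not_lt.mp hlt)
    unfold mergeHasCommon
    rw [if_neg hlt, if_neg hgt]
    simp only [true_iff]
    exact ⟨y, by simp [hxy], by simp⟩

-- ===== VERDICT (by name: the statement is the Claim_ definition above) =====
theorem check_author_match_py_spec : Claim_equal_check_author_match_py := by
  intro cited_authors crossref_authors _
  unfold Spec_check_author_match_py
  cases cited_authors with
  | none => rfl
  | some cited =>
    by_cases h : (cited.isEmpty || crossref_authors.isEmpty) = true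
    · simp [check_author_match_py, check_author_match_py_alt, h]
    · simp only [check_author_match_py, check_author_match_py_alt, h, if_false, Bool.false_eq_true]
      rw [pvStep_eq_lambda]
      set crossS := crossref_authors.foldl pvStep PySem.Set.empty with hcrossS
      set altS := PySem.Set.ofList ((crossref_authors.filter (fun a => pvFamily a ≠ "")).map
          (fun a => PySem.Str.lower (pvFamily a))) with haltS
      set citedS := PySem.Set.ofList (cited.map extractLastname) with hcitedS
      have hmem : ∀ x, x ∈ crossS ↔ x ∈ altS := by
        intro x
        rw [hcrossS, haltS, mem_foldl_pvStep, mem_altSet]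
        simp [PySem.Set.empty]
      have hempty : crossS.isEmpty = (PySem.List.sorted altS (fun x => x) false).isEmpty := by
        rw [Bool.eq_iff_iff]
        simp only [List.isEmpty_iff]
        rw [PySem.List.sorted_eq_nil_iff]
        constructor
        · intro h0; rw [List.eq_nil_iff_forall_not_mem]; intro x hx
          have := (hmem x).mpr hx; rw [h0] at this; exact absurd this (List.not_mem_nil)
        · intro h0; rw [List.eq_nil_iff_forall_not_mem]; intro x hx
          have := (hmem x).mp hx; rw [h0] at this; exact absurd this (List.not_mem_nil)
      rw [hempty]
      split
      · rfl
      · congr 1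
        rw [Bool.eq_iff_iff]
        rw [mergeHasCommon_iff _ _
          (by simpa using PySem.List.sorted_pairwise citedS (fun x => x))
          (by simpa using PySem.List.sorted_pairwise altS (fun x => x))]
        constructor
        · intro hb
          by_cases h0 : PySem.Set.inter citedS crossS = []
          · rw [h0] at hb; simp at hb
          · rcases List.exists_mem_of_ne_nil _ h0 with ⟨z, hz⟩
            have hz2 := (PySem.Set.mem_inter _ _ _).mp hz
            refine ⟨z, ?_, ?_⟩
            · rw [PySem.List.mem_sorted]; exact hz2.1
            · rw [PySem.List.mem_sorted]; exact (hmem z).mp hz2.2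
        · rintro ⟨z, hz1, hz2⟩
          rw [PySem.List.mem_sorted] at hz1 hz2
          have hzm : z ∈ PySem.Set.inter citedS crossS :=
            (PySem.Set.mem_inter _ _ _).mpr ⟨hz1, (hmem z).mpr hz2⟩
          have h0 : PySem.Set.inter citedS crossS ≠ [] := by
            intro h0; rw [h0] at hzm; exact absurd hzm (List.not_mem_nil)
          simp [h0]
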